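-- pv_equiv track=rewrite | github.com/vishnu-117/codes_and_note | scaler dsa/search and sort/sorting/elements_removal.py | solve
-- ===== SOURCE A (Python) =====
-- def solve(A):
--     A.sort()
--     length = len(A)
--     if length == 1:
--         return A[0]
--     elif length == 2:
--         return A[1]+A[0]+A[0]
--     else:
--         result = sum(A)
--         sum1 = sum(A)
--         for i in range(len(A)-2, -1, -1):
--             sum1 -= A[i+1]
--             result += sum1
--             # import pdb; pdb.set_trace()
--     return result
-- ===== SOURCE B (Python) =====
-- def solve(A):
--     A.sort()
--     n = len(A)
--     return sum((n - i) * v for i, v in enumerate(A))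
-- ===== Notes on version B (the rewrite author's own statement) =====
-- stated objective: simpler
-- what changed: Replaces A's length case-split and backward running-suffix-sum loop by one closed-form weighted sum: after sorting, each element at index i contributes (n-i) times, so the result is sum((n-i)*A[i]) in a single enumerate pass.
import Mathlib
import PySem

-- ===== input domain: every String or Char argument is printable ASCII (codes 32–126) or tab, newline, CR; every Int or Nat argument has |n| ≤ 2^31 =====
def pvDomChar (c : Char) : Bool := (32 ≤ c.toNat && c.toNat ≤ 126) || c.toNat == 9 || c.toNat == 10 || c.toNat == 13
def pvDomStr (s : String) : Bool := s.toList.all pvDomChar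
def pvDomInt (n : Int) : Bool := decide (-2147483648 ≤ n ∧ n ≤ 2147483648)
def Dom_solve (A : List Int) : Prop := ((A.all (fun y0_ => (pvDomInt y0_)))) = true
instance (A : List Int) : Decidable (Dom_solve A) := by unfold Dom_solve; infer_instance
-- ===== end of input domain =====

-- B replaces A's length case-split and backward running-suffix-sum loop by one closed-form
-- weighted sum over the sorted list (objective: simpler). Both Pythons sort A in place; the
-- equivalence proved here is about the return value (B performs the same mutation).

-- ===== PORT A =====
-- loop body of A's 'for i in range(len(A)-2, -1, -1)': state is (result, sum1)
def solveLoop (S : List Int) (st : Int × Int) (i : Int) : Int × Int :=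
  let sum1 := st.2 - PySem.List.pyGetD S (i + 1) 0
  (st.1 + sum1, sum1)

def solve (A : List Int) : Int :=
  let S := PySem.List.sorted A (fun x => x)          -- A.sort()
  let length : Int := (S.length : Int)
  if length = 1 then PySem.List.pyGetD S 0 0
  else if length = 2 then
    PySem.List.pyGetD S 1 0 + PySem.List.pyGetD S 0 0 + PySem.List.pyGetD S 0 0
  else
    -- result = sum(A); sum1 = sum(A); for i in range(len(A)-2, -1, -1): sum1 -= A[i+1]; result += sum1
    ((PySem.List.pyRange (length - 2) (-1) (-1)).foldl (solveLoop S) (S.sum, S.sum)).1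

-- ===== PORT B =====
def solve_alt (A : List Int) : Int :=
  let S := PySem.List.sorted A (fun x => x)          -- A.sort()
  let n : Int := (S.length : Int)
  ((PySem.List.enumerate S).map (fun p => (n - p.1) * p.2)).sum

-- ===== PRECONDITION & SPEC =====
def Spec_solve (A : List Int) (out : Int) : Prop := out = solve_alt A
instance (A : List Int) (out : Int) : Decidable (Spec_solve A out) := by unfold Spec_solve; infer_instance

-- ===== CLAIM (what is proved, stated in full; the proofs are below) =====
def Claim_equal_solve : Prop := ∀ (A : List Int), Dom_solve A → Spec_solve A (solve A)

-- ===== LEMMAS AND PROOFS =====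

-- sum of the first k elements (the value A's 'sum1' holds when the loop index reaches k-1)
def pfx (L : List Int) (k : Nat) : Int := (L.take k).sum

-- SP L m = pfx L 1 + pfx L 2 + … + pfx L m
def SP (L : List Int) : Nat → Int
  | 0 => 0
  | m + 1 => SP L m + pfx L (m + 1)

-- weighted sum with weight counting down from w (the shape of B's enumerate pass)
def wsum : List Int → Int → Int
  | [], _ => 0
  | x :: t, w => w * x + wsum t (w - 1)

lemma pfx_succ (L : List Int) (k : Nat) (h : k < L.length) :
    pfx L (k + 1) = pfx L k + L.getD k 0 := by
  unfold pfx
  rw [List.take_add_one, List.sum_append, List.getD_eq_getElem?_getD,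
      List.getElem?_eq_getElem h]
  simp

lemma SP_pred_add (L : List Int) (m : Nat) : SP L m = SP L (m - 1) + pfx L m := by
  cases m with
  | zero => simp [SP, pfx]
  | succ m => simp [SP]

-- B's enumerate pass computes wsum
lemma enum_wsum (L : List Int) : ∀ (c s : Int),
    ((PySem.List.enumerate L s).map (fun p => (c - p.1) * p.2)).sum = wsum L (c - s) := by
  induction L with
  | nil => intro c s; simp [PySem.List.enumerate_nil, wsum]
  | cons x t ih =>
    intro c s
    rw [PySem.List.enumerate_cons]
    simp only [List.map_cons, List.sum_cons, wsum, ih c (s + 1)]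
    ring_nf

lemma wsum_eq_SP (L : List Int) : wsum L (L.length : Int) = SP L L.length := by
  induction L with
  | nil => simp [wsum, SP]
  | cons x t ih =>
    have hcons : ∀ m : Nat, SP (x :: t) m = m * x + SP t (m - 1) := by
      intro m
      induction m with
      | zero => simp [SP]
      | succ m ihm =>
        have hpfx : pfx (x :: t) (m + 1) = x + pfx t m := by
          simp [pfx, List.take_succ_cons]
        rw [SP, ihm, hpfx]
        rw [show (m + 1 - 1 : Nat) = m from rfl, SP_pred_add t m]
        push_cast
        ring
    rw [show ((x :: t).length : Int) = (t.length : Int) + 1 by simp]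
    show ((t.length : Int) + 1) * x + wsum t ((t.length : Int) + 1 - 1) = _
    rw [show ((t.length : Int) + 1 - 1) = (t.length : Int) from by ring, ih,
        hcons (x :: t).length]
    rw [show ((x :: t).length : Nat) = t.length + 1 from by simp,
        show (t.length + 1 - 1 : Nat) = t.length from rfl]
    push_cast
    ring

-- A's loop invariant: running over [m, m-1, …, 0] with sum1 = pfx L (m+2) adds SP-terms
lemma solveLoop_run (L : List Int) : ∀ (m : Nat), m + 1 < L.length → ∀ (r : Int),
    (PySem.List.pyRange (m : Int) (-1) (-1)).foldl (solveLoop L) (r, pfx L (m + 2))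
      = (r + SP L (m + 1), pfx L 1) := by
  intro m
  induction m with
  | zero =>
    intro h r
    rw [PySem.List.pyRange_neg_one_cons (by norm_num),
        PySem.List.pyRange_neg_one_eq_nil (by norm_num)]
    simp only [List.foldl_cons, List.foldl_nil, solveLoop]
    rw [show ((0 : Nat) : Int) + 1 = ((1 : Nat) : Int) from by norm_num,
        PySem.List.pyGetD_natCast]
    have h2 := pfx_succ L 1 h
    rw [show (1 + 1 : Nat) = 2 from rfl] at h2
    have hSP : SP L (0 + 1) = pfx L 1 := by simp [SP]
    rw [show (0 + 2 : Nat) = 2 from rfl, Prod.mk.injEq]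
    constructor <;> omega
  | succ m ih =>
    intro h r
    have hm : m + 1 < L.length := Nat.lt_of_succ_lt h
    rw [PySem.List.pyRange_neg_one_cons (by push_cast; omega)]
    simp only [List.foldl_cons, solveLoop]
    rw [show ((m + 1 : Nat) : Int) + 1 = ((m + 2 : Nat) : Int) from by push_cast; ring_nf,
        PySem.List.pyGetD_natCast]
    have hstep : pfx L (m + 1 + 2) - L.getD (m + 2) 0 = pfx L (m + 2) := by
      have h2 := pfx_succ L (m + 2) h
      rw [show (m + 2 + 1 : Nat) = m + 1 + 2 from rfl] at h2
      omega
    rw [hstep, show ((m + 1 : Nat) : Int) - 1 = (m : Int) from by push_cast; ring,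
        ih hm (r + pfx L (m + 2))]
    rw [Prod.mk.injEq]
    refine ⟨?_, rfl⟩
    have hSP : SP L (m + 1 + 1) = SP L (m + 1) + pfx L (m + 1 + 1) := rfl
    rw [hSP, show (m + 1 + 1 : Nat) = m + 2 from rfl]
    ring

lemma alt_eq_SP (A : List Int) : solve_alt A = SP (PySem.List.sorted A (fun x => x))
    ((PySem.List.sorted A (fun x => x)).length) := by
  simp only [solve_alt]
  rw [enum_wsum (PySem.List.sorted A (fun x => x))
      ((PySem.List.sorted A (fun x => x)).length : Int) 0, sub_zero, wsum_eq_SP]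

-- the body of A after the sort, characterised for every list
lemma bodyA_eq_SP (L : List Int) :
    (if (L.length : Int) = 1 then PySem.List.pyGetD L 0 0
     else if (L.length : Int) = 2 then
       PySem.List.pyGetD L 1 0 + PySem.List.pyGetD L 0 0 + PySem.List.pyGetD L 0 0
     else ((PySem.List.pyRange ((L.length : Int) - 2) (-1) (-1)).foldl
             (solveLoop L) (L.sum, L.sum)).1)
      = SP L L.length := by
  match L with
  | [] =>
    norm_num [SP]
  | [x] =>
    norm_num [PySem.List.pyGetD_zero, SP, pfx]
  | [x, y] =>
    norm_num [PySem.List.pyGetD_zero, PySem.List.pyGetD_ofNat', SP, pfx]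
    ring
  | x :: y :: z :: t =>
    have h1 : ¬ (((x :: y :: z :: t).length : Int) = 1) := by
      simp only [List.length_cons]; omega
    have h2 : ¬ (((x :: y :: z :: t).length : Int) = 2) := by
      simp only [List.length_cons]; omega
    rw [if_neg h1, if_neg h2]
    have hlen : 3 ≤ (x :: y :: z :: t).length := by simp
    set L' := x :: y :: z :: t with hL
    have hm : ((L'.length : Int) - 2) = ((L'.length - 2 : Nat) : Int) := by omega
    have hn2 : L'.length - 2 + 2 = L'.length := by omega
    have hsum : L'.sum = pfx L' (L'.length - 2 + 2) := by rw [hn2]; simp [pfx]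
    rw [hm, hsum, solveLoop_run L' (L'.length - 2) (by omega) (pfx L' (L'.length - 2 + 2))]
    show pfx L' (L'.length - 2 + 2) + SP L' (L'.length - 2 + 1) = SP L' L'.length
    have hn1 : L'.length - 2 + 1 = L'.length - 1 := by omega
    rw [hn2, hn1]
    have hsp := SP_pred_add L' L'.length
    have hpl : pfx L' L'.length = L'.sum := by simp [pfx]
    omega

lemma solve_eq_SP (A : List Int) : solve A = SP (PySem.List.sorted A (fun x => x))
    ((PySem.List.sorted A (fun x => x)).length) := bodyA_eq_SP _

-- ===== VERDICT (by name: the statement is the Claim_ definition above) =====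
theorem solve_spec : Claim_equal_solve := by
  intro A _
  show solve A = solve_alt A
  rw [solve_eq_SP, alt_eq_SP]
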